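-- pv_equiv track=rewrite | github.com/sayami00/Advance_RAG_Doc_ChatBox | workflow/langgraph_function copy 2.py | _is_allowed_query
-- ===== SOURCE A (Python) =====
-- def _is_allowed_query(query: str) -> bool:
--     disallowed = [
--         "ignore instructions",
--         "system prompt",
--         "politics",
--         "religion",
--         "hack",
--         "password",
--         "song",
--         "love",
--     ]
--     return not any(bad_word in query.lower() for bad_word in disallowed)
-- ===== SOURCE B (Python) =====
-- def _is_allowed_query(query: str) -> bool:
--     phrases = [
--         "ignore instructions",
--         "system prompt",
--         "politics",
--         "religion",
--         "hack",
--         "password",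
--         "song",
--         "love",
--     ]
--     q = query.lower()
--     # single left-to-right scan: at each position test whether any phrase starts there
--     return not any(q.startswith(p, i) for i in range(len(q) + 1) for p in phrases)
-- ===== Notes on version B (the rewrite author's own statement) =====
-- stated objective: alternative
-- what changed: Replaced the phrase-major loop of 8 independent substring searches with a single position-major left-to-right scan of the lowered query that tests at each position whether any phrase starts there.
import Mathlib
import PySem

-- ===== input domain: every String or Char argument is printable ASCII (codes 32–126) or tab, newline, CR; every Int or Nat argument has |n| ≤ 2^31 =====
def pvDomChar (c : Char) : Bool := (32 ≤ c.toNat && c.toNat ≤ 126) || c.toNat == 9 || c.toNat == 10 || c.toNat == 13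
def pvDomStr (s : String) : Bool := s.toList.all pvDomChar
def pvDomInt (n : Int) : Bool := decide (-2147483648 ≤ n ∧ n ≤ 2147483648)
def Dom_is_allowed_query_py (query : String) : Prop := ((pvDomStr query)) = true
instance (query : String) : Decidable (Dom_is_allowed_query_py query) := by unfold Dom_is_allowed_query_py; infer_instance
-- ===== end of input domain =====

-- B replaces the phrase-major loop (8 independent substring searches) with one
-- position-major left-to-right scan of the lowered query; alternative decomposition, same cost.


-- ===== PORT A =====
def pvDisallowed : List String :=
  ["ignore instructions", "system prompt", "politics", "religion",
   "hack", "password", "song", "love"]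

-- not any(bad_word in query.lower() for bad_word in disallowed)
def is_allowed_query_py (query : String) : Bool :=
  !(pvDisallowed.any (fun bad => PySem.Str.isIn bad (PySem.Str.lower query)))

-- ===== PORT B =====
def pvPhrases : List (List Char) :=
  ["ignore instructions".toList, "system prompt".toList, "politics".toList,
   "religion".toList, "hack".toList, "password".toList, "song".toList, "love".toList]

-- any(q.startswith(p, i) ...): walk the suffixes of q, at each position test every phrase
def pvScanHit : List Char → Bool
  | [] => pvPhrases.any (fun p => p.isPrefixOf [])
  | c :: rest => pvPhrases.any (fun p => p.isPrefixOf (c :: rest)) || pvScanHit rest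

def is_allowed_query_py_alt (query : String) : Bool :=
  !(pvScanHit (PySem.Chars.lower query.toList))

-- ===== PRECONDITION & SPEC =====
def Spec_is_allowed_query_py (query : String) (out : Bool) : Prop := out = is_allowed_query_py_alt query
instance (query : String) (out : Bool) : Decidable (Spec_is_allowed_query_py query out) := by unfold Spec_is_allowed_query_py; infer_instance

-- ===== CLAIM (what is proved, stated in full; the proofs are below) =====
def Claim_equal_is_allowed_query_py : Prop := ∀ (query : String), Dom_is_allowed_query_py query → Spec_is_allowed_query_py query (is_allowed_query_py query)

-- ===== LEMMAS AND PROOFS =====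

theorem pvScanHit_iff (cs : List Char) :
    pvScanHit cs = true ↔ ∃ p ∈ pvPhrases, p <:+: cs := by
  induction cs with
  | nil =>
      simp [pvScanHit, List.isPrefixOf_iff_prefix]
  | cons c rest ih =>
      simp only [pvScanHit, Bool.or_eq_true, List.any_eq_true, List.isPrefixOf_iff_prefix, ih]
      constructor
      · rintro (⟨p, hp, h⟩ | ⟨p, hp, h⟩)
        · exact ⟨p, hp, h.isInfix⟩
        · exact ⟨p, hp, h.trans (List.suffix_cons c rest).isInfix⟩
      · rintro ⟨p, hp, h⟩
        rcases List.infix_cons_iff.mp h with h' | h'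
        · exact Or.inl ⟨p, hp, h'⟩
        · exact Or.inr ⟨p, hp, h'⟩

theorem pvAny_iff (q : String) :
    (pvDisallowed.any (fun bad => PySem.Str.isIn bad (PySem.Str.lower q))) = true ↔
      ∃ p ∈ pvPhrases, p <:+: PySem.Chars.lower q.toList := by
  simp only [List.any_eq_true, PySem.Str.isIn_iff_infix]
  constructor
  · rintro ⟨bad, hb, h⟩
    refine ⟨bad.toList, ?_, ?_⟩
    · fin_cases hb <;> simp [pvPhrases]
    · simpa [PySem.Str.lower] using h
  · rintro ⟨p, hp, h⟩
    have : ∃ bad ∈ pvDisallowed, bad.toList = p := by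
      fin_cases hp <;> simp [pvDisallowed]
    rcases this with ⟨bad, hb, rfl⟩
    exact ⟨bad, hb, by simpa [PySem.Str.lower] using h⟩

-- ===== VERDICT (by name: the statement is the Claim_ definition above) =====
theorem is_allowed_query_py_spec : Claim_equal_is_allowed_query_py := by
  intro query _
  unfold Spec_is_allowed_query_py is_allowed_query_py is_allowed_query_py_alt
  congr 1
  rw [Bool.eq_iff_iff, pvAny_iff, pvScanHit_iff]
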